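-- pv_equiv track=rewrite | github.com/IkarosKurtz/Loomer | src/loomer/libs/f8_f4_to_img.py | chain_code_to_coordinates
-- ===== SOURCE A (Python) =====
-- def chain_code_to_coordinates(chain_code, directions):
--   """
--   Converts a chain code to a list of coordinates using the given directions.
--   """
--   x_coords = [0]
--   y_coords = [0]
--   current_x, current_y = 0, 0
--
--   for code in chain_code:
--     if code in range(len(directions)):
--       dx, dy = directions[code]
--       current_x += dx
--       current_y += dy
--       x_coords.append(current_x)
--       y_coords.append(current_y)
--
--   return x_coords, y_coords
-- ===== SOURCE B (Python) =====
-- def _scan(deltas):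
--   """Prefix sums of deltas, starting at 0."""
--   out = [0]
--   total = 0
--   for d in deltas:
--     total += d
--     out.append(total)
--   return out
--
-- def chain_code_to_coordinates(chain_code, directions):
--   """
--   Converts a chain code to a list of coordinates using the given directions.
--   """
--   n = len(directions)
--   deltas = [directions[c] for c in chain_code if c in range(n)]
--   return _scan([d[0] for d in deltas]), _scan([d[1] for d in deltas])
-- ===== Notes on version B (the rewrite author's own statement) =====
-- stated objective: alternative
-- what changed: A's single interleaved loop mutating four state variables (x list, y list, current x, current y) is replaced by a two-stage decomposition: first build the filtered delta list, then turn each coordinate's deltas into coordinates with an independent prefix-sum scan helper.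
import Mathlib
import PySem

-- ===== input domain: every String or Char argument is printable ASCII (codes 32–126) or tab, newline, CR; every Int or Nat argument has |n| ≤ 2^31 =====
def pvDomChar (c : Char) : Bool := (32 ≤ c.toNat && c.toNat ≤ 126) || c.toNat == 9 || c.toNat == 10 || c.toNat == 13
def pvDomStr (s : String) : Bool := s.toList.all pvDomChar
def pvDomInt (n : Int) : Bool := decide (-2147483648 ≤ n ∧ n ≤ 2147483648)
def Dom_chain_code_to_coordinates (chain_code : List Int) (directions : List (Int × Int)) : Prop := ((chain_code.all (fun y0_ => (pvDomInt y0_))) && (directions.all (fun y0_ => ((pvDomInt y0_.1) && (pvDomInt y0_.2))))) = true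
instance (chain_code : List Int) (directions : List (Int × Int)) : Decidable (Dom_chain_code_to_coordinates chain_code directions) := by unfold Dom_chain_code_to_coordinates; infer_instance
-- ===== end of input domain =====

-- B replaces A's interleaved four-variable append loop with a build-deltas-then-recursive-prefix-scan decomposition (objective: alternative; no speed claim).
-- ===== PORT A =====
-- A: loop over chain_code with state (x_coords, y_coords, current_x, current_y); directions[code] is
-- guarded by 'code in range(len(directions))', so pyGet? is some there and getD (0,0) is never the default.
def pvStep (directions : List (Int × Int))
    (s : List Int × List Int × Int × Int) (code : Int) : List Int × List Int × Int × Int :=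
  if 0 ≤ code ∧ code < (directions.length : Int) then
    let d := (PySem.List.pyGet? directions code).getD (0, 0)
    let cx := s.2.2.1 + d.1
    let cy := s.2.2.2 + d.2
    (s.1 ++ [cx], s.2.1 ++ [cy], cx, cy)
  else s

def chain_code_to_coordinates (chain_code : List Int) (directions : List (Int × Int)) : List Int × List Int :=
  let st := chain_code.foldl (pvStep directions) ([0], [0], 0, 0)
  (st.1, st.2.1)

-- ===== PORT B =====
-- B helper: _scan(deltas) — prefix sums starting at 0, a fold carrying (out, total).
def pvScanF (deltas : List Int) : List Int :=
  (deltas.foldl (fun (s : List Int × Int) d => (s.1 ++ [s.2 + d], s.2 + d)) ([0], 0)).1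

def chain_code_to_coordinates_alt (chain_code : List Int) (directions : List (Int × Int)) : List Int × List Int :=
  let deltas := (chain_code.filter
      (fun c => decide (0 ≤ c) && decide (c < (directions.length : Int)))).map
    (fun c => (PySem.List.pyGet? directions c).getD (0, 0))
  (pvScanF (deltas.map Prod.fst), pvScanF (deltas.map Prod.snd))

-- ===== PRECONDITION & SPEC =====
def Spec_chain_code_to_coordinates (chain_code : List Int) (directions : List (Int × Int)) (out : List Int × List Int) : Prop := out = chain_code_to_coordinates_alt chain_code directions
instance (chain_code : List Int) (directions : List (Int × Int)) (out : List Int × List Int) : Decidable (Spec_chain_code_to_coordinates chain_code directions out) := by unfold Spec_chain_code_to_coordinates; infer_instance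

-- ===== CLAIM (what is proved, stated in full; the proofs are below) =====
def Claim_equal_chain_code_to_coordinates : Prop := ∀ (chain_code : List Int) (directions : List (Int × Int)), Dom_chain_code_to_coordinates chain_code directions → Spec_chain_code_to_coordinates chain_code directions (chain_code_to_coordinates chain_code directions)

-- ===== LEMMAS AND PROOFS =====

-- ===== VERDICT (by name: the statement is the Claim_ definition above) =====
-- Proof-only helper: recursive prefix-sum scan, a common characterisation of both ports.
def pvScan (deltas : List Int) (acc : Int) : List Int :=
  match deltas with
  | [] => [acc]
  | d :: ds => acc :: pvScan ds (acc + d)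

-- The head of pvScan is its start, so prepending the start reconstructs the full scan.
theorem pvScan_head (ds : List Int) (a : Int) : a :: (pvScan ds a).tail = pvScan ds a := by
  cases ds <;> simp [pvScan]

-- Invariant: running A's loop from state (xs, ys, cx, cy) appends the tails of the prefix-sum
-- scans of the filtered delta lists.
theorem pvFold_eq (directions : List (Int × Int)) (chain_code : List Int) :
    ∀ (xs ys : List Int) (cx cy : Int),
      (chain_code.foldl (pvStep directions) (xs, ys, cx, cy)).1 =
        xs ++ (pvScan (((chain_code.filter
            (fun c => decide (0 ≤ c) && decide (c < (directions.length : Int)))).map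
          (fun c => (PySem.List.pyGet? directions c).getD (0, 0))).map Prod.fst) cx).tail ∧
      (chain_code.foldl (pvStep directions) (xs, ys, cx, cy)).2.1 =
        ys ++ (pvScan (((chain_code.filter
            (fun c => decide (0 ≤ c) && decide (c < (directions.length : Int)))).map
          (fun c => (PySem.List.pyGet? directions c).getD (0, 0))).map Prod.snd) cy).tail := by
  induction chain_code with
  | nil => intro xs ys cx cy; simp [pvScan]
  | cons c cc ih =>
    intro xs ys cx cy
    by_cases h : 0 ≤ c ∧ c < (directions.length : Int)
    · have hstep : pvStep directions (xs, ys, cx, cy) c =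
          (xs ++ [cx + ((PySem.List.pyGet? directions c).getD (0, 0)).1],
           ys ++ [cy + ((PySem.List.pyGet? directions c).getD (0, 0)).2],
           cx + ((PySem.List.pyGet? directions c).getD (0, 0)).1,
           cy + ((PySem.List.pyGet? directions c).getD (0, 0)).2) := by
        simp [pvStep, h]
      have hfil : (c :: cc).filter
          (fun c => decide (0 ≤ c) && decide (c < (directions.length : Int))) =
          c :: cc.filter (fun c => decide (0 ≤ c) && decide (c < (directions.length : Int))) := by
        simp [h.1, h.2]
      have hd := ih (xs ++ [cx + ((PySem.List.pyGet? directions c).getD (0, 0)).1])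
        (ys ++ [cy + ((PySem.List.pyGet? directions c).getD (0, 0)).2])
        (cx + ((PySem.List.pyGet? directions c).getD (0, 0)).1)
        (cy + ((PySem.List.pyGet? directions c).getD (0, 0)).2)
      rw [List.foldl_cons, hstep, hfil]
      constructor
      · rw [hd.1]; simp [pvScan, pvScan_head]
      · rw [hd.2]; simp [pvScan, pvScan_head]
    · have hstep : pvStep directions (xs, ys, cx, cy) c = (xs, ys, cx, cy) := by
        simp [pvStep, h]
      have hfil : (c :: cc).filter
          (fun c => decide (0 ≤ c) && decide (c < (directions.length : Int))) =
          cc.filter (fun c => decide (0 ≤ c) && decide (c < (directions.length : Int))) := by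
        rcases not_and_or.mp h with h1 | h1 <;> simp [h1]
      rw [List.foldl_cons, hstep, hfil]
      exact ih xs ys cx cy

-- B's fold-based scan from state (out, total) appends the tail of the recursive scan.
theorem pvScanF_fold_eq (ds : List Int) :
    ∀ (out : List Int) (total : Int),
      (ds.foldl (fun (s : List Int × Int) d => (s.1 ++ [s.2 + d], s.2 + d)) (out, total)).1 =
        out ++ (pvScan ds total).tail := by
  induction ds with
  | nil => intro out total; simp [pvScan]
  | cons d ds ih =>
    intro out total
    rw [List.foldl_cons]
    show (ds.foldl _ (out ++ [total + d], total + d)).1 = _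
    rw [ih (out ++ [total + d]) (total + d)]
    simp [pvScan, pvScan_head]

theorem pvScanF_eq (ds : List Int) : pvScanF ds = pvScan ds 0 := by
  unfold pvScanF
  rw [pvScanF_fold_eq ds [0] 0]
  exact pvScan_head ds 0

theorem chain_code_to_coordinates_spec : Claim_equal_chain_code_to_coordinates := by
  intro chain_code directions _
  unfold Spec_chain_code_to_coordinates chain_code_to_coordinates chain_code_to_coordinates_alt
  have h := pvFold_eq directions chain_code [0] [0] 0 0
  refine Prod.ext ?_ ?_
  · show (chain_code.foldl (pvStep directions) ([0], [0], 0, 0)).1 = _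
    rw [h.1]; show _ = pvScanF _; rw [pvScanF_eq]; exact pvScan_head _ 0
  · show (chain_code.foldl (pvStep directions) ([0], [0], 0, 0)).2.1 = _
    rw [h.2]; show _ = pvScanF _; rw [pvScanF_eq]; exact pvScan_head _ 0
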